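-- pv_equiv track=rewrite | github.com/beyondbordertourism/beyondborderweb | scripts/import_user_data.py | extract_visa_required
-- ===== SOURCE A (Python) =====
-- def extract_visa_required(content):
--     """Determine if visa is required based on content"""
--     content_lower = content.lower()
--
--     # Check for visa-free indicators (more comprehensive)
--     visa_free_phrases = [
--         'visa-free entry', 'no visa required', 'visa free', 'without a visa',
--         'visa-free for', 'do not need a visa', 'visa exemption', 'no visa needed',
--         'visa-free access', 'visa waiver', 'visa-free travel'
--     ]
--
--     if any(phrase in content_lower for phrase in visa_free_phrases):
--         return False
--
--     # Check for specific visa-free scenarios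
--     if 'indonesia' in content_lower and any(phrase in content_lower for phrase in [
--         'visa-free for 30 days', 'visa-free entry for tourism', 'no visa required for tourism'
--     ]):
--         return False
--
--     # Check for visa required indicators
--     visa_required_phrases = [
--         'visa required', 'must obtain', 'require a visa', 'pre-approved visa',
--         'visa is mandatory', 'need to apply for visa', 'visa must be obtained'
--     ]
--
--     if any(phrase in content_lower for phrase in visa_required_phrases):
--         return True
--
--     # Special handling for countries that have both visa-free and visa-required options
--     # If content mentions both, prefer the more restrictive (visa required) interpretation
--     has_visa_free = any(phrase in content_lower for phrase in visa_free_phrases)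
--     has_visa_required = any(phrase in content_lower for phrase in visa_required_phrases)
--
--     if has_visa_free and has_visa_required:
--         # If both are mentioned, check which is the primary/default option
--         if 'for short' in content_lower and 'visa-free' in content_lower:
--             return False  # Short stays are visa-free
--         else:
--             return True  # Default to visa required if mixed signals
--
--     return True  # Default to visa required
-- ===== SOURCE B (Python) =====
-- def extract_visa_required(content):
--     """Determine if visa is required based on content"""
--     content_lower = content.lower()
--     # Every later branch of the original is dead: the Indonesia phrases all
--     # contain a visa-free phrase, and the mixed-signal block needs has_visa_free
--     # which is False once the first check fails.  So: visa required unless a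
--     # visa-free phrase occurs.
--     visa_free_phrases = (
--         'visa-free entry', 'no visa required', 'visa free', 'without a visa',
--         'visa-free for', 'do not need a visa', 'visa exemption', 'no visa needed',
--         'visa-free access', 'visa waiver', 'visa-free travel'
--     )
--     return not any(phrase in content_lower for phrase in visa_free_phrases)
-- ===== Notes on version B (the rewrite author's own statement) =====
-- stated objective: simpler
-- what changed: B drops A's dead code (the Indonesia branch is subsumed by the first visa-free check, and the mixed-signal block can never fire because has_visa_free is False there), reducing the decision to the negation of a single scan over the visa-free phrase list.
import Mathlib
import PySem

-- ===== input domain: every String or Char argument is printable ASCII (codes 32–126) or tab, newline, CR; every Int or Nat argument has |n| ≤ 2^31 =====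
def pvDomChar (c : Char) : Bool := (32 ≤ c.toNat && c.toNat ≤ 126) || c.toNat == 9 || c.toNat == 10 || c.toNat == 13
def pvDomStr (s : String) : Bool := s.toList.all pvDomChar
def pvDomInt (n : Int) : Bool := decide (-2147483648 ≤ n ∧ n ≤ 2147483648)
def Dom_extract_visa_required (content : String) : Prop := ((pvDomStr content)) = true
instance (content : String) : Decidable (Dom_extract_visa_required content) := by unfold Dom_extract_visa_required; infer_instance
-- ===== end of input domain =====

-- B removes A's dead branches (the Indonesia phrases contain visa-free phrases; the
-- mixed-signal block needs has_visa_free, which is False past the first check) and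
-- returns 'no visa-free phrase found' directly; objective: simpler.

-- ===== PORT A =====
def pvVisaFreePhrases : List String :=
  ["visa-free entry", "no visa required", "visa free", "without a visa",
   "visa-free for", "do not need a visa", "visa exemption", "no visa needed",
   "visa-free access", "visa waiver", "visa-free travel"]

def pvVisaRequiredPhrases : List String :=
  ["visa required", "must obtain", "require a visa", "pre-approved visa",
   "visa is mandatory", "need to apply for visa", "visa must be obtained"]

def extract_visa_required (content : String) : Bool :=
  let content_lower := PySem.Str.lower content
  if pvVisaFreePhrases.any (fun p => PySem.Str.isIn p content_lower) then
    false
  else if PySem.Str.isIn "indonesia" content_lower &&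
      (["visa-free for 30 days", "visa-free entry for tourism",
        "no visa required for tourism"].any (fun p => PySem.Str.isIn p content_lower)) then
    false
  else if pvVisaRequiredPhrases.any (fun p => PySem.Str.isIn p content_lower) then
    true
  else
    let has_visa_free := pvVisaFreePhrases.any (fun p => PySem.Str.isIn p content_lower)
    let has_visa_required := pvVisaRequiredPhrases.any (fun p => PySem.Str.isIn p content_lower)
    if has_visa_free && has_visa_required then
      if PySem.Str.isIn "for short" content_lower && PySem.Str.isIn "visa-free" content_lower then
        false
      else
        true
    else
      true

-- ===== PORT B =====
def extract_visa_required_alt (content : String) : Bool :=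
  let content_lower := PySem.Str.lower content
  !(pvVisaFreePhrases.any (fun p => PySem.Str.isIn p content_lower))

-- ===== PRECONDITION & SPEC =====
def Spec_extract_visa_required (content : String) (out : Bool) : Prop := out = extract_visa_required_alt content
instance (content : String) (out : Bool) : Decidable (Spec_extract_visa_required content out) := by unfold Spec_extract_visa_required; infer_instance

-- ===== CLAIM (what is proved, stated in full; the proofs are below) =====
def Claim_equal_extract_visa_required : Prop := ∀ (content : String), Dom_extract_visa_required content → Spec_extract_visa_required content (extract_visa_required content)

-- ===== LEMMAS AND PROOFS =====

-- a phrase whose prefix is some visa-free phrase is only found when that phrase is found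
theorem pvIsIn_of_prefix (p q s : String) (h : p.toList <+: q.toList)
    (hq : PySem.Str.isIn q s = true) : PySem.Str.isIn p s = true := by
  rw [PySem.Str.isIn_iff_infix] at hq ⊢
  exact List.IsInfix.trans (List.IsPrefix.isInfix h) hq

-- ===== VERDICT (by name: the statement is the Claim_ definition above) =====
theorem extract_visa_required_spec : Claim_equal_extract_visa_required := by
  intro content _
  unfold Spec_extract_visa_required extract_visa_required extract_visa_required_alt
  set cl := PySem.Str.lower content with hcl
  by_cases h : pvVisaFreePhrases.any (fun p => PySem.Str.isIn p cl) = true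
  · simp only [PySem.Str.isIn_eq] at h
    simp [h]
  · have hall : ∀ p ∈ pvVisaFreePhrases, PySem.Str.isIn p cl = false := by
      intro p hp
      by_contra hne
      exact h (List.any_eq_true.mpr ⟨p, hp, by simpa using hne⟩)
    have h1 : PySem.Str.isIn "visa-free for 30 days" cl = false := by
      by_contra hne
      have := pvIsIn_of_prefix "visa-free for" "visa-free for 30 days" cl (by decide)
        (by simpa using hne)
      rw [hall "visa-free for" (by decide)] at this; exact absurd this (by decide)
    have h2 : PySem.Str.isIn "visa-free entry for tourism" cl = false := by
      by_contra hne
      have := pvIsIn_of_prefix "visa-free entry" "visa-free entry for tourism" cl (by decide)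
        (by simpa using hne)
      rw [hall "visa-free entry" (by decide)] at this; exact absurd this (by decide)
    have h3 : PySem.Str.isIn "no visa required for tourism" cl = false := by
      by_contra hne
      have := pvIsIn_of_prefix "no visa required" "no visa required for tourism" cl (by decide)
        (by simpa using hne)
      rw [hall "no visa required" (by decide)] at this; exact absurd this (by decide)
    simp only [PySem.Str.isIn_eq] at h
    simp at h1 h2 h3
    simp [h, h1, h2, h3]
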